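-- pv_equiv track=rewrite | github.com/JessiDG/is_anachronistic | is_anachronistic.py | to_unique_set
-- ===== SOURCE A (Python) =====
-- import string
--
-- def to_unique_set(text):
--
--     if type(text) is not str:
--         raise TypeError("Please input a string")
--
--     to_remove = string.punctuation + '-' + "\"" + "\'" + string.digits
--     stripped_string = ""
--     for char in str(text):
--         if char in to_remove:
--             stripped_string += ' '
--         else:
--             stripped_string += char.lower()
--
--     list_stripped_string = stripped_string.split()
--
--     unique_words_set = set(list_stripped_string)
--     return unique_words_set
-- ===== SOURCE B (Python) =====
-- import string
--
-- def to_unique_set(text):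
--     if type(text) is not str:
--         raise TypeError("Please input a string")
--
--     words = set()
--     i, n = 0, len(text)
--     while i < n:
--         if text[i].isalpha():
--             j = i
--             while j < n and text[j].isalpha():
--                 j += 1
--             words.add(text[i:j].lower())
--             i = j
--         else:
--             i += 1
--     return words
-- ===== Notes on version B (the rewrite author's own statement) =====
-- stated objective: alternative
-- what changed: B is a two-pointer scanner that slices each maximal alphabetic run out of the original text and lowercases it as a word (on the printable-ASCII domain the word characters are exactly the letters), with no delimiter table and no scrubbed copy; A builds a scrubbed copy of the whole string character by character and then split()s it into a list and converts that to a set.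
import Mathlib
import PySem

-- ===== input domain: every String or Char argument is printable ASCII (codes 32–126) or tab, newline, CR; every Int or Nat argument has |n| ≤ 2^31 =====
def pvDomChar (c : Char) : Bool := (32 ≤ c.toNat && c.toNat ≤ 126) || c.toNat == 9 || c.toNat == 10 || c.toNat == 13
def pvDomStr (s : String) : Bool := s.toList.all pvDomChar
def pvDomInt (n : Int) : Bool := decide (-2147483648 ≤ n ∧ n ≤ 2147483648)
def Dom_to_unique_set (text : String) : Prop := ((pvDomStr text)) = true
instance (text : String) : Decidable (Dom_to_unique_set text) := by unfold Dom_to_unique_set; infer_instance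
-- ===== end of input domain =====

-- B scans the text with two index pointers, slicing out each maximal alphabetic run and
-- lowercasing it as a word, with no delimiter table and no scrubbed copy of the string;
-- A builds a scrubbed copy character by character and then split()s it.

set_option maxRecDepth 20000

-- ===== PORT A =====
-- to_remove = string.punctuation + '-' + '"' + "'" + string.digits  (as a char list)
def pvToRemove : List Char := ['!', '"', '#', '$', '%', '&', '\'', '(', ')', '*', '+', ',', '-', '.', '/', ':', ';', '<', '=', '>', '?', '@', '[', '\\', ']', '^', '_', '`', '{', '|', '}', '~', '-', '"', '\'', '0', '1', '2', '3', '4', '5', '6', '7', '8', '9']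

def to_unique_set (text : String) : List String :=
  let stripped : List Char :=
    text.toList.foldl
      (fun acc c => if pvToRemove.contains c then acc ++ [' '] else acc ++ [PySem.Chars.lowerChar c]) []
  PySem.Set.ofList ((PySem.Chars.split₀ stripped).map String.ofList)

-- ===== PORT B =====
-- B's outer while loop: at an alphabetic char, the inner 'while j < n and text[j].isalpha()'
-- scan is the span of the alphabetic run (takeWhile = the slice text[i:j], dropWhile = the
-- resumption point i = j); at a non-alphabetic char it advances by one.
def pvWordsB (cs : List Char) : List (List Char) :=
  match cs with
  | [] => []
  | c :: rest =>
    if PySem.Chars.isalpha c then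
      PySem.Chars.lower (c :: rest.takeWhile PySem.Chars.isalpha)
        :: pvWordsB (rest.dropWhile PySem.Chars.isalpha)
    else
      pvWordsB rest
termination_by cs.length
decreasing_by
  · simpa using Nat.lt_succ_of_le (List.length_dropWhile_le PySem.Chars.isalpha rest)
  · simp

def to_unique_set_alt (text : String) : List String :=
  PySem.Set.ofList ((pvWordsB text.toList).map String.ofList)

-- ===== PRECONDITION & SPEC =====
def Spec_to_unique_set (text : String) (out : List String) : Prop := out = to_unique_set_alt text
instance (text : String) (out : List String) : Decidable (Spec_to_unique_set text out) := by unfold Spec_to_unique_set; infer_instance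

-- ===== CLAIM =====
def Claim_equal_to_unique_set : Prop := ∀ (text : String), Dom_to_unique_set text → Spec_to_unique_set text (to_unique_set text)

-- ===== LEMMAS AND PROOFS =====

-- A's per-character scrubbing function (the body of A's loop, as a function of the character)
def pvScrub (c : Char) : Char :=
  if pvToRemove.contains c then ' ' else PySem.Chars.lowerChar c

-- A's scrubbing loop is a map of pvScrub over the characters
theorem pv_stripped (cs : List Char) :
    cs.foldl (fun acc c => if pvToRemove.contains c then acc ++ [' '] else acc ++ [PySem.Chars.lowerChar c]) []
      = cs.map pvScrub := by
  have h : ∀ (l : List Char) (acc : List Char),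
      l.foldl (fun acc c => if pvToRemove.contains c then acc ++ [' '] else acc ++ [PySem.Chars.lowerChar c]) acc
        = acc ++ l.map pvScrub := by
    intro l
    induction l with
    | nil => simp
    | cons c l ih =>
      intro acc
      rw [List.foldl_cons, List.map_cons]
      by_cases h : pvToRemove.contains c
      · rw [if_pos h, ih, show pvScrub c = ' ' from by unfold pvScrub; rw [if_pos h]]
        simp
      · rw [if_neg h, ih, show pvScrub c = PySem.Chars.lowerChar c from by unfold pvScrub; rw [if_neg h]]
        simp
  simpa using h cs []

-- On ASCII characters: B's word test (isalpha) is exactly "A's scrubbed character is not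
-- whitespace", and on word characters A's scrubbing is plain lowercasing
theorem pv_ascii_facts : ∀ n < 127, pvDomChar (Char.ofNat n) = true →
    (PySem.Chars.isalpha (Char.ofNat n) = !(PySem.Chars.isspace (pvScrub (Char.ofNat n))))
    ∧ (PySem.Chars.isalpha (Char.ofNat n) = true →
        pvScrub (Char.ofNat n) = PySem.Chars.lowerChar (Char.ofNat n)) := by decide

theorem pv_dom_lt (c : Char) (h : pvDomChar c = true) : c.toNat < 127 := by
  unfold pvDomChar at h
  simp only [Bool.or_eq_true, Bool.and_eq_true, decide_eq_true_eq, beq_iff_eq] at h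
  omega

theorem pv_boundary (c : Char) (h : pvDomChar c = true) :
    PySem.Chars.isalpha c = !(PySem.Chars.isspace (pvScrub c)) := by
  have := (pv_ascii_facts c.toNat (pv_dom_lt c h) (by rwa [Char.ofNat_toNat])).1
  rwa [Char.ofNat_toNat] at this

theorem pv_scrub_alpha (c : Char) (h : pvDomChar c = true) (ha : PySem.Chars.isalpha c = true) :
    pvScrub c = PySem.Chars.lowerChar c := by
  have := (pv_ascii_facts c.toNat (pv_dom_lt c h) (by rwa [Char.ofNat_toNat])).2
  rw [Char.ofNat_toNat] at this
  exact this ha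

-- split₀.go's accumulator is a reversed prefix of the final word list
theorem pv_go_acc (cs : List Char) (cur : List Char) (acc : List (List Char)) :
    PySem.Chars.split₀.go cs cur acc = acc.reverse ++ PySem.Chars.split₀.go cs cur [] := by
  induction cs generalizing cur acc with
  | nil =>
    simp only [PySem.Chars.split₀.go]
    split_ifs <;> simp
  | cons c cs ih =>
    simp only [PySem.Chars.split₀.go]
    split_ifs with h1 h2
    · rw [ih _ acc]
    · rw [ih _ (cur.reverse :: acc), ih _ [cur.reverse]]
      simp
    · rw [ih (c :: cur) acc]

-- inside a word, split() on the scrubbed text collects exactly the lowercased alphabetic run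
theorem pv_go_word (cs : List Char) (h : ∀ c ∈ cs, pvDomChar c = true)
    (cur : List Char) (hne : cur ≠ []) :
    PySem.Chars.split₀.go (cs.map pvScrub) cur []
      = (cur.reverse ++ PySem.Chars.lower (cs.takeWhile PySem.Chars.isalpha))
        :: PySem.Chars.split₀.go ((cs.dropWhile PySem.Chars.isalpha).map pvScrub) [] [] := by
  induction cs generalizing cur with
  | nil =>
    simp [PySem.Chars.split₀.go, List.isEmpty_iff, hne, PySem.Chars.lower]
  | cons c cs ih =>
    have hc : pvDomChar c = true := h c (by simp)
    have hcs : ∀ x ∈ cs, pvDomChar x = true := fun x hx => h x (by simp [hx])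
    by_cases ha : PySem.Chars.isalpha c = true
    · have hsp : PySem.Chars.isspace (pvScrub c) = false := by
        have := pv_boundary c hc
        rw [ha] at this
        simpa using this.symm
      simp only [List.map_cons, PySem.Chars.split₀.go, hsp, Bool.false_eq_true, if_false]
      rw [ih hcs (pvScrub c :: cur) (by simp), List.takeWhile_cons_of_pos ha,
        List.dropWhile_cons_of_pos ha, pv_scrub_alpha c hc ha]
      simp [PySem.Chars.lower]
    · have hsp : PySem.Chars.isspace (pvScrub c) = true := by
        have hb := pv_boundary c hc
        rw [Bool.not_eq_true] at ha
        rw [ha] at hb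
        simpa using hb.symm
      simp only [List.map_cons, PySem.Chars.split₀.go, hsp, if_true]
      rw [if_neg (by simpa using hne), pv_go_acc _ [] [cur.reverse]]
      rw [List.takeWhile_cons_of_neg (by simp [ha]), List.dropWhile_cons_of_neg (by simp [ha])]
      have : PySem.Chars.split₀.go ((c :: cs).map pvScrub) [] []
          = PySem.Chars.split₀.go (cs.map pvScrub) [] [] := by
        simp [PySem.Chars.split₀.go, hsp]
      rw [this]
      simp [PySem.Chars.lower]

-- split() of the scrubbed text = B's two-pointer word list (strong induction on length,
-- since B resumes after the whole alphabetic run)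
theorem pv_split_words : ∀ (n : Nat) (cs : List Char), cs.length ≤ n →
    (∀ c ∈ cs, pvDomChar c = true) →
    PySem.Chars.split₀.go (cs.map pvScrub) [] [] = pvWordsB cs := by
  intro n
  induction n with
  | zero =>
    intro cs hlen _
    have : cs = [] := List.length_eq_zero_iff.mp (Nat.le_zero.mp hlen)
    subst this
    simp [PySem.Chars.split₀.go, pvWordsB]
  | succ n ih =>
    intro cs hlen h
    match cs with
    | [] => simp [PySem.Chars.split₀.go, pvWordsB]
    | c :: rest =>
      have hc : pvDomChar c = true := h c (by simp)
      have hrest : ∀ x ∈ rest, pvDomChar x = true := fun x hx => h x (by simp [hx])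
      by_cases ha : PySem.Chars.isalpha c = true
      · have hsp : PySem.Chars.isspace (pvScrub c) = false := by
          have := pv_boundary c hc
          rw [ha] at this
          simpa using this.symm
        simp only [List.map_cons, PySem.Chars.split₀.go, hsp, Bool.false_eq_true, if_false]
        rw [pv_go_word rest hrest [pvScrub c] (by simp)]
        rw [ih (rest.dropWhile PySem.Chars.isalpha)
            (le_trans (List.length_dropWhile_le _ _) (by simpa using Nat.lt_succ_iff.mp (lt_of_lt_of_le (by simp) hlen)))
            (fun x hx => hrest x ((rest.dropWhile_sublist PySem.Chars.isalpha).mem hx))]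
        rw [pv_scrub_alpha c hc ha]
        simp [pvWordsB, ha, PySem.Chars.lower]
      · have hsp : PySem.Chars.isspace (pvScrub c) = true := by
          have hb := pv_boundary c hc
          rw [Bool.not_eq_true] at ha
          rw [ha] at hb
          simpa using hb.symm
        simp only [List.map_cons, PySem.Chars.split₀.go, hsp, List.isEmpty_nil, if_pos]
        rw [ih rest (by simpa using Nat.lt_succ_iff.mp (lt_of_lt_of_le (by simp) hlen)) hrest]
        simp [pvWordsB, ha]

-- ===== VERDICT =====
theorem to_unique_set_spec : Claim_equal_to_unique_set := by
  intro text hdom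
  unfold Spec_to_unique_set to_unique_set to_unique_set_alt
  rw [pv_stripped]
  have h : ∀ c ∈ text.toList, pvDomChar c = true := by
    unfold Dom_to_unique_set pvDomStr at hdom
    simpa [List.all_eq_true] using hdom
  show PySem.Set.ofList ((PySem.Chars.split₀ (text.toList.map pvScrub)).map String.ofList)
      = PySem.Set.ofList ((pvWordsB text.toList).map String.ofList)
  rw [show PySem.Chars.split₀ (text.toList.map pvScrub)
        = PySem.Chars.split₀.go (text.toList.map pvScrub) [] [] from rfl,
      pv_split_words text.toList.length text.toList le_rfl h]
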